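-- pv_equiv track=rewrite | github.com/drathke924/userscripts | Advent_of_Code_2016/06.py | partTwo
-- ===== SOURCE A (Python) =====
-- def partTwo(chars):
-- 	answer = ""
-- 	for charset in chars:
-- 		checked = []
-- 		least = ['a', 1000]
-- 		for char in charset:
-- 			if char not in checked:
-- 				checked.append(char)
-- 				if charset.count(char) < least[1]:
-- 					least = [char, charset.count(char)]
-- 		answer += least[0]
-- 	return answer
-- ===== SOURCE B (Python) =====
-- def partTwo(chars):
--     answer = ""
--     for line in chars:
--         runs = []
--         for c in sorted(line):
--             if runs and runs[-1][2] == c: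
--                 runs[-1] = (runs[-1][0] + 1, runs[-1][1], c)
--             else:
--                 runs.append((1, line.index(c), c))
--         answer += min(runs)[2] if runs else 'a'
--     return answer
-- ===== Notes on version B (the rewrite author's own statement) =====
-- stated objective: alternative
-- what changed: Replaces A's dedup-list bookkeeping with repeated charset.count scans and a strict-less running-minimum loop by sorting each line, run-length-encoding the sorted line into (count, first-index, char) triples, and taking the lexicographic min of the triples ('a' for an empty line, as A).
-- intended difference: On nonempty lines in which every character occurs at least 1000 times and some character strictly precedes 'a' in the (frequency, first-occurrence) order (in particular when 'a' is absent), A's strict-less comparison never beats its initializer ['a', 1000] so A emits the sentinel 'a' for that column, while B emits the line's actual least-frequent earliest character, which is what the puzzle asks for. — e.g. on partTwo(["bbbbbbbbbbbbbbbbbbbbbbbbbbbbbbbbbbbbbbbbbbbbbbbbbbbbbbbbbbbbbbbbbbbbbbbbbbbbbbbbbbbbbbbbbbbbbbbbbbbbbbbbbbbbbbbbbbbbb…): A returns "a", B returns "b"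
import Mathlib
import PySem

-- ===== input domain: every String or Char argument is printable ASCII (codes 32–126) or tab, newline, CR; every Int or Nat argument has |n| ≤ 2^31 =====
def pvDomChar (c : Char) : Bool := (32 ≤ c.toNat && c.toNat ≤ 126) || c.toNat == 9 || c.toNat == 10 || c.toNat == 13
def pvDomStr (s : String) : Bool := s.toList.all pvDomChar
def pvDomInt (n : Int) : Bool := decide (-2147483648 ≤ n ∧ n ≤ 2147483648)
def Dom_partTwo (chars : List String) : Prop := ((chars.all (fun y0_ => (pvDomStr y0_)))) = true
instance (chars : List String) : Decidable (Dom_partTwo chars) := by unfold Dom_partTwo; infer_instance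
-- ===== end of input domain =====

-- B replaces A's checked-list + strict-less running-minimum loop (with repeated charset.count scans) by
-- sort + run-length-encoding into (count, first-index, char) triples + one lexicographic min; on lines where
-- every character occurs ≥ 1000 times A returns its sentinel 'a' while B returns the real answer (see D_).


-- ===== PORT A =====
def partTwo (chars : List String) : String :=
  chars.foldl (fun answer charset =>
    let least := charset.toList.foldl
      (fun (st : List Char × Char × Int) char =>
        if char ∉ st.1 then
          let checked := st.1 ++ [char]
          if (charset.toList.count char : Int) < st.2.2 then
            (checked, char, (charset.toList.count char : Int))
          else
            (checked, st.2.1, st.2.2)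
        else st)
      (([] : List Char), 'a', (1000 : Int))
    answer ++ String.ofList [least.2.1]) ""

-- ===== PORT B =====
-- one step of Source B's inner loop: extend the last run if its char is c, else append a fresh run
-- (1, line.index(c), c); line.index(c) never raises since c comes from sorted(line), so the
-- .getD 0 default of index? is unreachable.
def pvBStep (line : List Char) (runs : List (Int × Int × Char)) (c : Char) : List (Int × Int × Char) :=
  match runs.getLast? with
  | some r =>
      if r.2.2 = c then runs.dropLast ++ [(r.1 + 1, r.2.1, c)]
      else runs ++ [(1, (((PySem.List.index? line c).getD 0 : Nat) : Int), c)]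
  | none => runs ++ [(1, (((PySem.List.index? line c).getD 0 : Nat) : Int), c)]

-- min(runs) compares the triples lexicographically; the char component is never consulted because the
-- first-index components are pairwise distinct, so min2? on (count, index) is exact; none is exactly
-- Source B's "if runs else" branch (an empty line).
def partTwo_alt (chars : List String) : String :=
  chars.foldl (fun answer line =>
    let runs := (PySem.List.sorted line.toList (fun c => c) false).foldl (pvBStep line.toList) []
    match PySem.List.min2? runs (fun r => r.1) (fun r => r.2.1) with
    | some best => answer ++ String.ofList [best.2.2]
    | none => answer ++ String.ofList ['a']) ""

-- ===== PRECONDITION & SPEC =====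
-- On nonempty lines in which every character occurs at least 1000 times and some character strictly
-- precedes 'a' in the (frequency, first-occurrence) order (in particular when 'a' is absent), A's
-- strict-less comparison never beats its initializer ['a', 1000] so A emits the sentinel 'a' for that
-- column, while B emits the line's actual least-frequent earliest character, which is what the puzzle
-- asks for.
def D_partTwo (chars : List String) : Prop :=
  ∃ s ∈ chars, s.toList ≠ [] ∧ (∀ c ∈ s.toList, 1000 ≤ s.toList.count c) ∧
    ('a' ∉ s.toList ∨ ∃ c ∈ s.toList, s.toList.count c < s.toList.count 'a' ∨
      (s.toList.count c = s.toList.count 'a' ∧ s.toList.idxOf c < s.toList.idxOf 'a'))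
instance (chars : List String) : Decidable (D_partTwo chars) := by unfold D_partTwo; infer_instance

def Spec_partTwo (chars : List String) (out : String) : Prop := ¬ D_partTwo chars → out = partTwo_alt chars
instance (chars : List String) (out : String) : Decidable (Spec_partTwo chars out) := by unfold Spec_partTwo; infer_instance

def pvDiffWitness_partTwo : List String := ["bbbbbbbbbbbbbbbbbbbbbbbbbbbbbbbbbbbbbbbbbbbbbbbbbbbbbbbbbbbbbbbbbbbbbbbbbbbbbbbbbbbbbbbbbbbbbbbbbbbbbbbbbbbbbbbbbbbbbbbbbbbbbbbbbbbbbbbbbbbbbbbbbbbbbbbbbbbbbbbbbbbbbbbbbbbbbbbbbbbbbbbbbbbbbbbbbbbbbbbbbbbbbbbbbbbbbbbbbbbbbbbbbbbbbbbbbbbbbbbbbbbbbbbbbbbbbbbbbbbbbbbbbbbbbbbbbbbbbbbbbbbbbbbbbbbbbbbbbbbbbbbbbbbbbbbbbbbbbbbbbbbbbbbbbbbbbbbbbbbbbbbbbbbbbbbbbbbbbbbbbbbbbbbbbbbbbbbbbbbbbbbbbbbbbbbbbbbbbbbbbbbbbbbbbbbbbbbbbbbbbbbbbbbbbbbbbb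bbbbbbbbbbbbbbbbbbbbbbbbbbbbbbbbbbbbbbbbbbbbbbbbbbbbbbbbbbbbbbbbbbbbbbbbbbbbbbbbbbbbbbbbbbbbbbbbbbbbbbbbbbbbbbbbbbbbbbbbbbbbbbbbbbbbbbbbbbbbbbbbbbbbbbbbbbbbbbbbbbbbbbbbbbbbbbbbbbbbbbbbbbbbbbbbbbbbbbbbbbbbbbbbbbbbbbbbbbbbbbbbbbbbbbbbbbbbbbbbbbbbbbbbbbbbbbbbbbbbbbbbbbbbbbbbbbbbbbbbbbbbbbbbbbbbbbbbbbbbbbbbbbbbbbbbbbbbbbbbbbbbbbbbbbbbbbbbbbbbbbbbbbbbbbbbbbbbbbbbbbbbbbbbbbbbbbbbbbbbbbbbbbbbbbbbbbbbbbbbbbbbbbbbbbbbbbbbbbbbbbbbbbbbbbbbbbbbbbbbbbbbbbbbbbbbbbbbbbbbbbbbbbbbbbbbbbbbbbbbbbbbbbbbbbbbbbbbbbbbbbbbbbbbbbbbbbbbbbbbbbbbbbbbbbbbbbbbbbbbbbbbbbbbbbbbbbbbbbbbbbbbbb"]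
def pvDiffWitnessOut_partTwo : String × String := ("a", "b")

-- ===== CLAIM (what is proved, stated in full; the proofs are below) =====
def Claim_unchanged_partTwo : Prop := ∀ (chars : List String), Dom_partTwo chars → Spec_partTwo chars (partTwo chars)
def Claim_exact_partTwo : Prop := ∀ (chars : List String), Dom_partTwo chars → D_partTwo chars → partTwo chars ≠ partTwo_alt chars
def Claim_changed_partTwo : Prop := Dom_partTwo (pvDiffWitness_partTwo) ∧ D_partTwo (pvDiffWitness_partTwo) ∧ partTwo (pvDiffWitness_partTwo) = pvDiffWitnessOut_partTwo.1 ∧ partTwo_alt (pvDiffWitness_partTwo) = pvDiffWitnessOut_partTwo.2 ∧ pvDiffWitnessOut_partTwo.1 ≠ pvDiffWitnessOut_partTwo.2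

-- ===== LEMMAS AND PROOFS =====

/-- Replace the current best pair by a candidate iff the candidate's value is strictly smaller. -/
def pvPairStep (q r : Char × Int) : Char × Int := if r.2 < q.2 then r else q

/-- First pair of minimal value in `p :: ps` (earliest wins ties). -/
def pvFirstMin : Char × Int → List (Char × Int) → Char × Int
  | p, [] => p
  | p, q :: t => if (pvFirstMin q t).2 < p.2 then pvFirstMin q t else p

/-- The fresh first occurrences of `l` relative to already-seen `ch`. -/
def pvDNew : List Char → List Char → List Char
  | _, [] => []
  | ch, c :: t => if c ∈ ch then pvDNew ch t else c :: pvDNew (ch ++ [c]) t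

theorem pvFirstMin_seed (t : List (Char × Int)) (r p : Char × Int) :
    pvFirstMin (pvPairStep p r) t = pvPairStep p (pvFirstMin r t) := by
  cases t with
  | nil => rfl
  | cons q t' =>
    simp only [pvFirstMin, pvPairStep]
    split_ifs <;> simp_all <;> omega

theorem pvFoldl_firstMin (ps : List (Char × Int)) (p : Char × Int) :
    ps.foldl pvPairStep p = pvFirstMin p ps := by
  induction ps generalizing p with
  | nil => rfl
  | cons r t ih =>
    rw [List.foldl_cons, ih, pvFirstMin_seed]
    rfl

theorem pvFirstMin_mem (p : Char × Int) (t : List (Char × Int)) :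
    pvFirstMin p t ∈ p :: t := by
  induction t generalizing p with
  | nil => simp [pvFirstMin]
  | cons q t' ih =>
    simp only [pvFirstMin]
    split_ifs with h
    · have := ih q
      simp_all only [List.mem_cons]
      tauto
    · simp

theorem pvFirstMin_min (p : Char × Int) (t : List (Char × Int)) :
    ∀ q ∈ p :: t, (pvFirstMin p t).2 ≤ q.2 := by
  induction t generalizing p with
  | nil => simp [pvFirstMin]
  | cons r t' ih =>
    intro q hq
    simp only [pvFirstMin]
    have h1 := ih r
    simp only [List.mem_cons] at hq
    rcases hq with h | h | h
    · subst h; split_ifs <;> omega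
    · subst h
      have := h1 q (by simp)
      split_ifs <;> omega
    · have := h1 q (by simp [h])
      split_ifs <;> omega

/-- The chosen pair is the FIRST minimal one: everything before it is strictly larger. -/
theorem pvFirstMin_first (p : Char × Int) (t : List (Char × Int)) :
    ∃ pre suf, p :: t = pre ++ pvFirstMin p t :: suf ∧ ∀ q ∈ pre, (pvFirstMin p t).2 < q.2 := by
  induction t generalizing p with
  | nil => exact ⟨[], [], rfl, by simp⟩
  | cons q t' ih =>
    simp only [pvFirstMin]
    split_ifs with h
    · obtain ⟨pre, suf, hsplit, hpre⟩ := ih q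
      exact ⟨p :: pre, suf, by rw [hsplit]; simp, by
        intro r hr
        rcases List.mem_cons.mp hr with h' | h'
        · subst h'; exact h
        · exact hpre r h'⟩
    · exact ⟨[], q :: t', rfl, by simp⟩

/-- A's inner loop, characterised: the checked list collects fresh first occurrences and the
    running pair is the strict-less fold over exactly those. -/
theorem pvLoopA (key : Char → Int) (l : List Char) (ch : List Char) (p : Char × Int) :
    l.foldl (fun (st : List Char × Char × Int) c =>
        if c ∉ st.1 then
          if key c < st.2.2 then (st.1 ++ [c], c, key c)
          else (st.1 ++ [c], st.2.1, st.2.2)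
        else st) (ch, p)
      = (ch ++ pvDNew ch l, (pvDNew ch l).foldl (fun q c => pvPairStep q (c, key c)) p) := by
  induction l generalizing ch p with
  | nil => simp [pvDNew]
  | cons c t ih =>
    rw [List.foldl_cons]
    by_cases h : c ∈ ch
    · have hstep : (if c ∉ (ch, p).1 then
            if key c < (ch, p).2.2 then ((ch, p).1 ++ [c], c, key c)
            else ((ch, p).1 ++ [c], (ch, p).2.1, (ch, p).2.2)
          else (ch, p)) = (ch, p) := by simp [h]
      have hd : pvDNew ch (c :: t) = pvDNew ch t := by simp [pvDNew, h]
      rw [hstep, ih, hd]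
    · have hstep : (if c ∉ (ch, p).1 then
            if key c < (ch, p).2.2 then ((ch, p).1 ++ [c], c, key c)
            else ((ch, p).1 ++ [c], (ch, p).2.1, (ch, p).2.2)
          else (ch, p)) = (ch ++ [c], pvPairStep p (c, key c)) := by
        simp only [pvPairStep]
        split_ifs <;> simp_all
      have hd : pvDNew ch (c :: t) = c :: pvDNew (ch ++ [c]) t := by simp [pvDNew, h]
      rw [hstep, ih, hd]
      simp

theorem pvDNew_ofList (l : List Char) : ∀ ch : List Char,
    l.foldl PySem.Set.add ch = ch ++ pvDNew ch l := by
  induction l with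
  | nil => intro ch; simp [pvDNew]
  | cons c t ih =>
    intro ch
    by_cases h : c ∈ ch
    · simp [PySem.Set.add, pvDNew, h, ih]
    · simp [PySem.Set.add, pvDNew, h, ih]

theorem pvSet_ofList_eq (l : List Char) : PySem.Set.ofList l = pvDNew [] l := by
  have := pvDNew_ofList l []
  simpa [PySem.Set.ofList, PySem.Set.empty] using this

/-- The single character A appends for one line. -/
def pvColA (cs : String) : Char :=
  (pvFirstMin ('a', 1000)
    ((PySem.Set.ofList cs.toList).map (fun c => (c, (cs.toList.count c : Int))))).1

theorem pvColA_spec (cs : String) :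
    (cs.toList.foldl
      (fun (st : List Char × Char × Int) char =>
        if char ∉ st.1 then
          if (cs.toList.count char : Int) < st.2.2 then
            (st.1 ++ [char], char, (cs.toList.count char : Int))
          else (st.1 ++ [char], st.2.1, st.2.2)
        else st)
      (([] : List Char), 'a', (1000 : Int))).2.1 = pvColA cs := by
  rw [pvLoopA (fun c => (cs.toList.count c : Int)) cs.toList [] ('a', 1000)]
  simp only [pvColA, pvSet_ofList_eq]
  rw [← pvFoldl_firstMin, List.foldl_map]

theorem pvPartTwo_cols (chars : List String) :
    partTwo chars = String.ofList (chars.map pvColA) := by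
  have key : ∀ (l : List String) (acc : String),
      l.foldl (fun (answer : String) (charset : String) =>
        answer ++ String.ofList [(charset.toList.foldl
          (fun (st : List Char × Char × Int) char =>
            if char ∉ st.1 then
              if (charset.toList.count char : Int) < st.2.2 then
                (st.1 ++ [char], char, (charset.toList.count char : Int))
              else (st.1 ++ [char], st.2.1, st.2.2)
            else st)
          (([] : List Char), 'a', (1000 : Int))).2.1]) acc
      = acc ++ String.ofList (l.map pvColA) := by
    intro l
    induction l with
    | nil => intro acc; simp
    | cons cs t ih =>
      intro acc
      rw [List.foldl_cons, ih, pvColA_spec, List.map_cons, String.append_assoc,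
        show String.ofList [pvColA cs] ++ String.ofList (t.map pvColA)
          = String.ofList (pvColA cs :: t.map pvColA) from (String.ofList_append).symm]
  rw [partTwo]
  simpa using key chars ""

-- ------- the common specification: the earliest least-frequent character -------

/-- `c` is a least-frequent character of `l`, and the earliest such (by first index). -/
def pvIsBest (l : List Char) (c : Char) : Prop :=
  c ∈ l ∧ ∀ d ∈ l, l.count c < l.count d ∨ (l.count c = l.count d ∧ l.idxOf c ≤ l.idxOf d)

theorem pvIsBest_unique (l : List Char) (c d : Char)
    (hc : pvIsBest l c) (hd : pvIsBest l d) : c = d := by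
  obtain ⟨hcm, hcmin⟩ := hc
  obtain ⟨hdm, hdmin⟩ := hd
  have h1 := hcmin d hdm
  have h2 := hdmin c hcm
  have hidx : l.idxOf c = l.idxOf d := by omega
  have hlt : l.idxOf c < l.length := List.idxOf_lt_length_of_mem hcm
  have hltd : l.idxOf d < l.length := List.idxOf_lt_length_of_mem hdm
  have h3 : l[l.idxOf c]'hlt = c := List.getElem_idxOf hlt
  have h4 : l[l.idxOf d]'hltd = d := List.getElem_idxOf hltd
  rw [← h3, ← h4]
  simp_rw [hidx]

/-- The first-occurrence dedup list is ordered by first index. -/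
theorem pvDedupIdx (l : List Char) :
    (PySem.List.dedup l).Pairwise (fun a b => l.idxOf a < l.idxOf b) := by
  induction l with
  | nil => simp [PySem.List.dedup_eq_ofList, PySem.Set.ofList_nil]
  | cons c t ih =>
    rw [PySem.List.dedup_eq_ofList, PySem.Set.ofList_cons]
    constructor
    · intro b hb
      have hb' := (PySem.Set.mem_discard _ _ _).mp hb
      rw [List.idxOf_cons_self]
      rw [List.idxOf_cons]
      have : (c == b) = false := by simp [hb'.2.symm]
      simp [this]
    · have hsub : (PySem.Set.discard (PySem.Set.ofList t) c).Sublist (PySem.Set.ofList t) :=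
        List.filter_sublist
      rw [PySem.List.dedup_eq_ofList] at ih
      have hpw := ih.sublist hsub
      apply hpw.imp_of_mem
      intro a b ha hb hab
      have ha' := ((PySem.Set.mem_discard _ _ _).mp ha).2
      have hb' := ((PySem.Set.mem_discard _ _ _).mp hb).2
      rw [List.idxOf_cons, List.idxOf_cons]
      have hca : (c == a) = false := by simp [ha'.symm]
      have hcb : (c == b) = false := by simp [hb'.symm]
      simp [hca, hcb]
      omega

theorem pvColA_isBest (cs : String)
    (hlow : ∃ d ∈ cs.toList, cs.toList.count d < 1000) :
    pvIsBest cs.toList (pvColA cs) := by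
  classical
  set l := cs.toList with hl
  set f : Char → Char × Int := fun c => (c, (l.count c : Int)) with hf
  set P : List (Char × Int) := (PySem.Set.ofList l).map f with hP
  set m : Char × Int := pvFirstMin ('a', 1000) P with hm
  have hmin : ∀ q ∈ ('a', (1000 : Int)) :: P, m.2 ≤ q.2 := pvFirstMin_min _ _
  obtain ⟨d0, hd0m, hd0⟩ := hlow
  have hd0P : f d0 ∈ P := List.mem_map_of_mem ((PySem.Set.mem_ofList _ _).mpr hd0m)
  have hm2 : m.2 < 1000 := by
    have := hmin (f d0) (by simp [hd0P])
    simp only [hf] at this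
    omega
  have hmem : m ∈ ('a', (1000 : Int)) :: P := pvFirstMin_mem _ _
  have hmP : m ∈ P := by
    rcases List.mem_cons.mp hmem with h | h
    · exfalso; rw [h] at hm2; omega
    · exact h
  obtain ⟨cstar, hcs, hfcs⟩ := List.mem_map.mp hmP
  have hm1 : m.1 = cstar := by rw [← hfcs]
  have hm2v : m.2 = (l.count cstar : Int) := by rw [← hfcs]
  obtain ⟨pre, suf, hsplit, hpre⟩ := pvFirstMin_first ('a', 1000) P
  rw [← hm] at hsplit hpre
  -- pre is nonempty (its head is the sentinel)
  obtain ⟨pre', hpre', hPdec⟩ : ∃ pre', pre = ('a', (1000 : Int)) :: pre' ∧ P = pre' ++ m :: suf := by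
    cases pre with
    | nil =>
      exfalso
      simp only [List.nil_append, List.cons.injEq] at hsplit
      rw [← hsplit.1] at hm2
      simp at hm2
    | cons p0 pre' =>
      simp only [List.cons_append, List.cons.injEq] at hsplit
      exact ⟨pre', by rw [hsplit.1], hsplit.2⟩
  have hpre'lt : ∀ q ∈ pre', m.2 < q.2 := fun q hq => hpre q (by rw [hpre']; simp [hq])
  -- decompose the dedup list along the map
  have hPdec' : List.map f (PySem.Set.ofList l) = pre' ++ m :: suf := by
    rw [← hP]; exact hPdec
  obtain ⟨l1, l2', hdd, hmapl1, hmapl2'⟩ := List.map_eq_append_iff.mp hPdec' 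
  obtain ⟨x, l2, hl2', hfx, hmapl2⟩ := List.map_eq_cons_iff.mp hmapl2'
  have hx : x = cstar := by
    have := congrArg Prod.fst hfx
    simp only [hf] at this
    rw [this, hm1]
  have hcol : pvColA cs = cstar := by
    simp only [pvColA, ← hl, ← hf, ← hP, ← hm, hm1]
  rw [hcol]
  constructor
  · exact (PySem.Set.mem_ofList _ _).mp hcs
  · intro d hd
    have hdP : f d ∈ P := List.mem_map_of_mem ((PySem.Set.mem_ofList _ _).mpr hd)
    have hled : m.2 ≤ (l.count d : Int) := by
      have := hmin (f d) (by simp [hdP])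
      simpa [hf] using this
    by_cases hcnt : l.count cstar < l.count d
    · exact Or.inl hcnt
    · have hcnteq : l.count cstar = l.count d := by
        rw [hm2v] at hled; omega
      refine Or.inr ⟨hcnteq, ?_⟩
      by_cases hdc : d = cstar
      · rw [hdc]
      · -- locate f d in the decomposition of P
        rw [hPdec] at hdP
        rcases List.mem_append.mp hdP with h | h
        · exfalso
          have := hpre'lt (f d) h
          rw [hm2v, hcnteq] at this
          simp [hf] at this
        · rcases List.mem_cons.mp h with h' | h'
          · exfalso
            apply hdc
            have := congrArg Prod.fst h'
            simp only [hf] at this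
            rw [this, hm1]
          · -- d is strictly later in the dedup list than cstar
            rw [← hmapl2] at h'
            obtain ⟨y, hy, hfy⟩ := List.mem_map.mp h'
            have hyd : y = d := by
              have := congrArg Prod.fst hfy
              simpa [hf] using this
            have hpw : (PySem.List.dedup l).Pairwise (fun a b => l.idxOf a < l.idxOf b) :=
              pvDedupIdx l
            rw [PySem.List.dedup_eq_ofList, hdd, hl2'] at hpw
            have h2 := (List.pairwise_append.mp hpw).2.1
            have h3 := (List.pairwise_cons.mp h2).1 y hy
            rw [hx, hyd] at h3
            omega

-- ------- B-side: run-length encoding of the sorted line -------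

/-- Run-length encoding of a grouped list, decorated with first index in `line`. -/
def pvRunsOf (line : List Char) : List Char → List (Int × Int × Char)
  | [] => []
  | c :: t =>
      ((1 + (t.takeWhile (· == c)).length : Nat), (((PySem.List.index? line c).getD 0 : Nat) : Int), c)
        :: pvRunsOf line (t.dropWhile (· == c))
  termination_by s => s.length
  decreasing_by
    simpa using Nat.lt_succ_of_le (List.length_dropWhile_le _ _)

theorem pvFoldRep (line : List Char) (c : Char) :
    ∀ (k : Nat) (rs : List (Int × Int × Char)) (m i : Int),
    (List.replicate k c).foldl (pvBStep line) (rs ++ [(m, i, c)]) = rs ++ [(m + k, i, c)] := by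
  intro k
  induction k with
  | zero => intro rs m i; simp
  | succ k ih =>
    intro rs m i
    rw [List.replicate_succ, List.foldl_cons]
    have hstep : pvBStep line (rs ++ [(m, i, c)]) c = rs ++ [(m + 1, i, c)] := by
      simp [pvBStep]
    rw [hstep, ih]
    have hmk : m + 1 + (k : Int) = m + ((k + 1 : Nat) : Int) := by push_cast; ring
    rw [hmk]

theorem pvNotMemDropWhile (c : Char) (t : List Char)
    (hpw : (c :: t).Pairwise (· ≤ ·)) : c ∉ t.dropWhile (· == c) := by
  induction t with
  | nil => simp
  | cons x t' ih =>
    have hcx : c ≤ x := (List.pairwise_cons.mp hpw).1 x (by simp)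
    have hxall : ∀ y ∈ t', x ≤ y := ((List.pairwise_cons.mp (List.pairwise_cons.mp hpw).2).1)
    have hct' : (c :: t').Pairwise (· ≤ ·) := by
      have : (c :: t').Sublist (c :: x :: t') := by
        apply List.cons_sublist_cons.mpr
        exact List.sublist_cons_self x t'
      exact hpw.sublist this
    by_cases h : x = c
    · subst h
      simpa using ih hct'
    · rw [List.dropWhile_cons]
      have : (x == c) = false := by simp [h]
      rw [this]
      simp only [Bool.false_eq_true, if_false, List.mem_cons]
      push Not
      refine ⟨fun h' => h h'.symm, fun hc' => ?_⟩
      have := hxall c hc'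
      exact h (le_antisymm this hcx)

theorem pvFoldRuns (line : List Char) (s : List Char) (hpw : s.Pairwise (· ≤ ·))
    (rs : List (Int × Int × Char)) (hrs : ∀ r, rs.getLast? = some r → r.2.2 ∉ s) :
    s.foldl (pvBStep line) rs = rs ++ pvRunsOf line s := by
  match s with
  | [] => simp [pvRunsOf]
  | c :: t =>
    have hstep : pvBStep line rs c
        = rs ++ [(1, (((PySem.List.index? line c).getD 0 : Nat) : Int), c)] := by
      unfold pvBStep
      cases hlast : rs.getLast? with
      | none => simp
      | some r =>
        have : r.2.2 ≠ c := by
          intro h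
          exact hrs r hlast (by simp [h])
        simp [this]
    rw [List.foldl_cons, hstep]
    have ht : t = t.takeWhile (· == c) ++ t.dropWhile (· == c) :=
      (List.takeWhile_append_dropWhile).symm
    have htake : t.takeWhile (· == c) = List.replicate (t.takeWhile (· == c)).length c := by
      apply List.eq_replicate_of_mem
      intro b hb
      have hb' := List.mem_takeWhile_imp hb
      exact eq_of_beq (by simpa using hb')
    rw [show t.foldl (pvBStep line) (rs ++ [(1, (((PySem.List.index? line c).getD 0 : Nat) : Int), c)])
          = (t.takeWhile (· == c) ++ t.dropWhile (· == c)).foldl (pvBStep line)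
            (rs ++ [(1, (((PySem.List.index? line c).getD 0 : Nat) : Int), c)]) by rw [← ht]]
    rw [List.foldl_append]
    rw [show (t.takeWhile (· == c)).foldl (pvBStep line)
          (rs ++ [(1, (((PySem.List.index? line c).getD 0 : Nat) : Int), c)])
        = rs ++ [(((1 + (t.takeWhile (· == c)).length : Nat) : Int),
            (((PySem.List.index? line c).getD 0 : Nat) : Int), c)] by
      set k := (t.takeWhile (· == c)).length with hk
      rw [htake, pvFoldRep]
      have hmk : (1 : Int) + (k : Int) = ((1 + k : Nat) : Int) := by push_cast; ring
      rw [hmk]]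
    have hpw' : (t.dropWhile (· == c)).Pairwise (· ≤ ·) :=
      hpw.sublist ((List.dropWhile_sublist _).trans (List.sublist_cons_self c t))
    have hnot : c ∉ t.dropWhile (· == c) := pvNotMemDropWhile c t hpw
    rw [pvFoldRuns line (t.dropWhile (· == c)) hpw'
        (rs ++ [(((1 + (t.takeWhile (· == c)).length : Nat) : Int),
          (((PySem.List.index? line c).getD 0 : Nat) : Int), c)])
        (by
          intro r hr
          rw [List.getLast?_concat] at hr
          cases hr
          simpa using hnot)]
    simp [pvRunsOf]
  termination_by s.length
  decreasing_by simpa using Nat.lt_succ_of_le (List.length_dropWhile_le _ _)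


-- ------- B-side: from the runs to the best character -------

theorem pvIndex_getD (l : List Char) (c : Char) (h : c ∈ l) :
    (PySem.List.index? l c).getD 0 = l.idxOf c := by
  rw [PySem.List.index?_eq_idxOf?]
  cases hq : List.idxOf? c l with
  | none => exact absurd (List.idxOf?_eq_none_iff.mp hq) (by simpa using h)
  | some k =>
    rw [List.idxOf_eq_getD_idxOf?, hq]
    rfl

theorem pvRunsOf_mem (line : List Char) (s : List Char) (hpw : s.Pairwise (· ≤ ·)) :
    ∀ r ∈ pvRunsOf line s,
      r = ((s.count r.2.2 : Int), (((PySem.List.index? line r.2.2).getD 0 : Nat) : Int), r.2.2)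
        ∧ r.2.2 ∈ s := by
  match s with
  | [] => intro r hr; simp [pvRunsOf] at hr
  | c :: t =>
    intro r hr
    have ht : t = t.takeWhile (· == c) ++ t.dropWhile (· == c) :=
      (List.takeWhile_append_dropWhile).symm
    have htake : t.takeWhile (· == c) = List.replicate (t.takeWhile (· == c)).length c := by
      apply List.eq_replicate_of_mem
      intro b hb
      have hb' := List.mem_takeWhile_imp hb
      exact eq_of_beq (by simpa using hb')
    have hnot : c ∉ t.dropWhile (· == c) := pvNotMemDropWhile c t hpw
    have hcount : (c :: t).count c = 1 + (t.takeWhile (· == c)).length := by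
      rw [List.count_cons_self]
      conv_lhs => rw [ht]
      rw [List.count_append]
      rw [htake, List.count_replicate]
      have h2 : (t.dropWhile (· == c)).count c = 0 := List.count_eq_zero.mpr hnot
      simp [h2]
      omega
    rw [pvRunsOf] at hr
    rcases List.mem_cons.mp hr with h | h
    · subst h
      refine ⟨?_, by simp⟩
      simp only
      rw [hcount]
    · have hpw' : (t.dropWhile (· == c)).Pairwise (· ≤ ·) :=
        hpw.sublist ((List.dropWhile_sublist _).trans (List.sublist_cons_self c t))
      obtain ⟨hshape, hmem⟩ := pvRunsOf_mem line (t.dropWhile (· == c)) hpw' r h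
      have hne : r.2.2 ≠ c := fun hh => hnot (hh ▸ hmem)
      have hcnt2 : (c :: t).count r.2.2 = (t.dropWhile (· == c)).count r.2.2 := by
        rw [List.count_cons_of_ne (Ne.symm hne)]
        conv_lhs => rw [ht]
        rw [List.count_append, htake, List.count_replicate]
        have : (c == r.2.2) = false := by
          simpa using Ne.symm hne
        simp [this]
      refine ⟨?_, List.mem_cons_of_mem c (by rw [ht]; exact List.mem_append_right _ hmem)⟩
      rw [hcnt2]
      exact hshape
  termination_by s.length
  decreasing_by simpa using Nat.lt_succ_of_le (List.length_dropWhile_le _ _)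

theorem pvRunsOf_complete (line : List Char) (s : List Char) :
    ∀ c ∈ s, ∃ r ∈ pvRunsOf line s, r.2.2 = c := by
  match s with
  | [] => intro c hc; simp at hc
  | c0 :: t =>
    intro c hc
    have ht : t = t.takeWhile (· == c0) ++ t.dropWhile (· == c0) :=
      (List.takeWhile_append_dropWhile).symm
    rcases List.mem_cons.mp hc with h | h
    · refine ⟨(((1 + (t.takeWhile (· == c0)).length : Nat) : Int),
        (((PySem.List.index? line c0).getD 0 : Nat) : Int), c0), ?_, by simp [h]⟩
      rw [pvRunsOf]
      exact List.mem_cons_self ..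
    · rw [ht] at h
      rcases List.mem_append.mp h with h' | h'
      · have hcc : c = c0 := eq_of_beq (by simpa using List.mem_takeWhile_imp h')
        refine ⟨(((1 + (t.takeWhile (· == c0)).length : Nat) : Int),
          (((PySem.List.index? line c0).getD 0 : Nat) : Int), c0), ?_, by simp [hcc]⟩
        rw [pvRunsOf]
        exact List.mem_cons_self ..
      · obtain ⟨r, hr, hrc⟩ := pvRunsOf_complete line (t.dropWhile (· == c0)) c h'
        exact ⟨r, by rw [pvRunsOf]; exact List.mem_cons_of_mem _ hr, hrc⟩
  termination_by s.length
  decreasing_by simpa using Nat.lt_succ_of_le (List.length_dropWhile_le _ _)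

/-- The fold step of `PySem.List.min2?` (definitionally). -/
def pvMin2Step {α : Type} (k1 k2 : α → Int) (acc : Option α) (x : α) : Option α :=
  match acc with
  | none => some x
  | some m =>
      if (decide (k1 x < k1 m) || !decide (k1 m < k1 x) && decide (k2 x < k2 m)) = true
      then some x else some m

theorem pvMin2_eq {α : Type} (k1 k2 : α → Int) (xs : List α) :
    PySem.List.min2? xs k1 k2 = xs.foldl (pvMin2Step k1 k2) none := rfl

/-- Python's min over (k1, k2)-lexicographic keys: the result is lexicographically minimal. -/
theorem pvMin2_spec {α : Type} (k1 k2 : α → Int) (xs : List α) (m : α)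
    (h : PySem.List.min2? xs k1 k2 = some m) :
    m ∈ xs ∧ ∀ y ∈ xs, k1 m < k1 y ∨ (k1 m = k1 y ∧ k2 m ≤ k2 y) := by
  have aux : ∀ (t : List α) (a : α) (m : α),
      t.foldl (pvMin2Step k1 k2) (some a) = some m →
      m ∈ a :: t ∧ ∀ y ∈ a :: t, k1 m < k1 y ∨ (k1 m = k1 y ∧ k2 m ≤ k2 y) := by
    intro t
    induction t with
    | nil =>
      intro a m hm
      simp only [List.foldl_nil, Option.some.injEq] at hm
      subst hm
      exact ⟨by simp, by intro y hy; simp at hy; subst hy; omega⟩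
    | cons x t' ih =>
      intro a m hm
      rw [List.foldl_cons] at hm
      have hm' : t'.foldl (pvMin2Step k1 k2)
          (if (decide (k1 x < k1 a) || !decide (k1 a < k1 x) && decide (k2 x < k2 a)) = true
           then some x else some a) = some m := hm
      by_cases hcond : (decide (k1 x < k1 a) || !decide (k1 a < k1 x) && decide (k2 x < k2 a)) = true
      · rw [if_pos hcond] at hm'
        obtain ⟨hmem, hmin⟩ := ih x m hm'
        have hxa : k1 x < k1 a ∨ (¬ k1 a < k1 x ∧ k2 x < k2 a) := by
          simpa using hcond
        have hmx := hmin x (by simp)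
        refine ⟨by rcases List.mem_cons.mp hmem with h' | h' <;> simp [h'], ?_⟩
        intro y hy
        rcases List.mem_cons.mp hy with h' | h'
        · subst h'; omega
        · exact hmin y h'
      · rw [if_neg hcond] at hm'
        obtain ⟨hmem, hmin⟩ := ih a m hm'
        have hxa : ¬ k1 x < k1 a ∧ (k1 a < k1 x ∨ ¬ k2 x < k2 a) := by
          simp only [Bool.or_eq_true, Bool.and_eq_true, Bool.not_eq_true',
            decide_eq_true_eq, decide_eq_false_iff_not] at hcond
          push Not at hcond
          omega
        have hma := hmin a (by simp)
        refine ⟨by rcases List.mem_cons.mp hmem with h' | h' <;> simp [h'], ?_⟩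
        intro y hy
        rcases List.mem_cons.mp hy with h' | h'
        · subst h'; omega
        · rcases List.mem_cons.mp h' with h'' | h''
          · subst h''; omega
          · exact hmin y (by simp [h''])
  match xs with
  | [] => simp [PySem.List.min2?] at h
  | x :: t =>
    rw [pvMin2_eq, List.foldl_cons] at h
    exact aux t x m h

theorem pvMin2_isSome {α : Type} (k1 k2 : α → Int) (x : α) (t : List α) :
    ∃ m, PySem.List.min2? (x :: t) k1 k2 = some m := by
  have aux : ∀ (t' : List α) (a : α), ∃ m, t'.foldl (pvMin2Step k1 k2) (some a) = some m := by
    intro t'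
    induction t' with
    | nil => intro a; exact ⟨a, rfl⟩
    | cons z t'' ih =>
      intro a
      rw [List.foldl_cons]
      show ∃ m, t''.foldl (pvMin2Step k1 k2)
          (if (decide (k1 z < k1 a) || !decide (k1 a < k1 z) && decide (k2 z < k2 a)) = true
           then some z else some a) = some m
      by_cases hcond : (decide (k1 z < k1 a) || !decide (k1 a < k1 z) && decide (k2 z < k2 a)) = true
      · rw [if_pos hcond]; exact ih z
      · rw [if_neg hcond]; exact ih a
  rw [pvMin2_eq, List.foldl_cons]
  exact aux t x

/-- The chunk B appends for one line. -/
def pvColB (line : String) : List Char :=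
  match PySem.List.min2?
      ((PySem.List.sorted line.toList (fun c => c) false).foldl (pvBStep line.toList) [])
      (fun r => r.1) (fun r => r.2.1) with
  | some best => [best.2.2]
  | none => ['a']

theorem pvPartTwoAlt_cols (chars : List String) :
    partTwo_alt chars = String.ofList (chars.flatMap pvColB) := by
  have key : ∀ (l : List String) (acc : String),
      l.foldl (fun answer line =>
        let runs := (PySem.List.sorted line.toList (fun c => c) false).foldl (pvBStep line.toList) []
        match PySem.List.min2? runs (fun r => r.1) (fun r => r.2.1) with
        | some best => answer ++ String.ofList [best.2.2]
        | none => answer ++ String.ofList ['a']) acc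
      = acc ++ String.ofList (l.flatMap pvColB) := by
    intro l
    induction l with
    | nil => intro acc; simp
    | cons cs t ih =>
      intro acc
      rw [List.foldl_cons]
      have hstep : (let runs := (PySem.List.sorted cs.toList (fun c => c) false).foldl (pvBStep cs.toList) []
          match PySem.List.min2? runs (fun r => r.1) (fun r => r.2.1) with
          | some best => acc ++ String.ofList [best.2.2]
          | none => acc ++ String.ofList ['a']) = acc ++ String.ofList (pvColB cs) := by
        simp only [pvColB]
        cases hmin : PySem.List.min2?
            ((PySem.List.sorted cs.toList (fun c => c) false).foldl (pvBStep cs.toList) [])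
            (fun r => r.1) (fun r => r.2.1) with
        | some best => simp
        | none => simp
      rw [hstep, ih, List.flatMap_cons, String.ofList_append, String.append_assoc]
  rw [partTwo_alt]
  simpa using key chars ""

theorem pvColB_isBest (cs : String) (hne : cs.toList ≠ []) :
    ∃ c, pvColB cs = [c] ∧ pvIsBest cs.toList c := by
  set l := cs.toList with hl
  set s := PySem.List.sorted l (fun c => c) false with hs
  have hpw : s.Pairwise (· ≤ ·) := by
    have := PySem.List.sorted_pairwise l (fun c => c)
    simpa using this
  have hperm : s.Perm l := PySem.List.sorted_perm l (fun c => c) false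
  have hfold : s.foldl (pvBStep l) [] = pvRunsOf l s :=
    pvFoldRuns l s hpw [] (by intro r hr; simp at hr)
  have hsne : s ≠ [] := by
    intro h
    have := hperm.length_eq
    rw [h] at this
    exact hne (List.eq_nil_of_length_eq_zero this.symm)
  obtain ⟨c0, t0, hs0⟩ := List.exists_cons_of_ne_nil hsne
  have hrne : pvRunsOf l s = (((1 + (t0.takeWhile (· == c0)).length : Nat) : Int),
      (((PySem.List.index? l c0).getD 0 : Nat) : Int), c0) :: pvRunsOf l (t0.dropWhile (· == c0)) := by
    rw [hs0, pvRunsOf]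
  obtain ⟨m, hmin⟩ : ∃ m, PySem.List.min2? (s.foldl (pvBStep l) [])
      (fun r => r.1) (fun r => r.2.1) = some m := by
    rw [hfold, hrne]
    exact pvMin2_isSome _ _ _ _
  obtain ⟨hmem, hminy⟩ := pvMin2_spec _ _ _ _ hmin
  rw [hfold] at hmem hminy
  obtain ⟨hshape, hmems⟩ := pvRunsOf_mem l s hpw m hmem
  have hml : m.2.2 ∈ l := hperm.mem_iff.mp hmems
  refine ⟨m.2.2, ?_, ?_, ?_⟩
  · simp only [pvColB, ← hl, ← hs, hmin]
  · exact hml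
  · intro d hd
    have hds : d ∈ s := hperm.mem_iff.mpr hd
    obtain ⟨rd, hrd, hrdc⟩ := pvRunsOf_complete l s d hds
    obtain ⟨hrdshape, _⟩ := pvRunsOf_mem l s hpw rd hrd
    have hy := hminy rd hrd
    have hm1 : m.1 = (s.count m.2.2 : Int) := by rw [hshape]
    have hm21 : m.2.1 = ((l.idxOf m.2.2 : Nat) : Int) := by
      rw [hshape]
      simp only
      rw [pvIndex_getD l m.2.2 hml]
    have hrd1 : rd.1 = (s.count d : Int) := by rw [hrdshape, hrdc]
    have hrd21 : rd.2.1 = ((l.idxOf d : Nat) : Int) := by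
      rw [hrdshape]
      simp only
      rw [hrdc, pvIndex_getD l d hd]
    have hc1 : s.count m.2.2 = l.count m.2.2 := hperm.count_eq m.2.2
    have hc2 : s.count d = l.count d := hperm.count_eq d
    rw [hm1, hrd1, hm21, hrd21, hc1, hc2] at hy
    rcases hy with h' | h'
    · left; exact_mod_cast h'
    · right
      constructor
      · exact_mod_cast h'.1
      · exact_mod_cast h'.2


theorem pvFirstMin_eq_self (p : Char × Int) (t : List (Char × Int))
    (h : ∀ q ∈ t, ¬ q.2 < p.2) : pvFirstMin p t = p := by
  cases t with
  | nil => rfl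
  | cons q t' =>
    simp only [pvFirstMin]
    have hmem := pvFirstMin_mem q t'
    rw [if_neg (h _ hmem)]

/-- When every character of the line occurs at least 1000 times, A's sentinel survives. -/
theorem pvColA_sentinel (cs : String) (hall : ∀ c ∈ cs.toList, 1000 ≤ cs.toList.count c) :
    pvColA cs = 'a' := by
  rw [pvColA, pvFirstMin_eq_self]
  intro q hq
  obtain ⟨c, hc, hfc⟩ := List.mem_map.mp hq
  have := hall c ((PySem.Set.mem_ofList _ _).mp hc)
  rw [← hfc]
  simp only
  omega

/-- The single character B appends for one line. -/
def pvColBc (cs : String) : Char :=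
  match PySem.List.min2?
      ((PySem.List.sorted cs.toList (fun c => c) false).foldl (pvBStep cs.toList) [])
      (fun r => r.1) (fun r => r.2.1) with
  | some best => best.2.2
  | none => 'a'

theorem pvColB_eq (cs : String) : pvColB cs = [pvColBc cs] := by
  rw [pvColB, pvColBc]
  cases PySem.List.min2?
      ((PySem.List.sorted cs.toList (fun c => c) false).foldl (pvBStep cs.toList) [])
      (fun r => r.1) (fun r => r.2.1) <;> rfl

-- ------- glue -------

theorem pvCol_empty (cs : String) (h : cs.toList = []) : pvColB cs = [pvColA cs] := by
  simp only [pvColB, pvColA, h]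
  rfl

theorem pvCol_agree (cs : String)
    (hnd : ¬ (cs.toList ≠ [] ∧ ∀ c ∈ cs.toList, 1000 ≤ cs.toList.count c)) :
    pvColB cs = [pvColA cs] := by
  by_cases hne : cs.toList = []
  · exact pvCol_empty cs hne
  · have hnall : ¬ ∀ c ∈ cs.toList, 1000 ≤ cs.toList.count c := fun hall => hnd ⟨hne, hall⟩
    push Not at hnall
    obtain ⟨c, hcol, hbest⟩ := pvColB_isBest cs hne
    have hbestA := pvColA_isBest cs hnall
    rw [hcol, pvIsBest_unique cs.toList c (pvColA cs) hbest hbestA]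

theorem pvFlatMap_eq_map (l : List String) (g : String → Char) (h : ∀ s ∈ l, pvColB s = [g s]) :
    l.flatMap pvColB = l.map g := by
  induction l with
  | nil => rfl
  | cons x t ih =>
    rw [List.flatMap_cons, List.map_cons, h x (by simp),
      ih (fun s hs => h s (by simp [hs]))]
    rfl

theorem pvOfList_replicate_b : ∀ n : Nat, PySem.Set.ofList (List.replicate (n + 1) 'b') = ['b'] := by
  have aux : ∀ n : Nat, (List.replicate n 'b').foldl PySem.Set.add ['b'] = ['b'] := by
    intro n
    induction n with
    | zero => rfl
    | succ k ih =>
      rw [List.replicate_succ, List.foldl_cons,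
        show PySem.Set.add ['b'] 'b' = ['b'] by simp [PySem.Set.add]]
      exact ih
  intro n
  rw [show List.replicate (n + 1) 'b' = 'b' :: List.replicate n 'b' from List.replicate_succ ..,
    PySem.Set.ofList, List.foldl_cons,
    show PySem.Set.add PySem.Set.empty 'b' = ['b'] by simp [PySem.Set.add, PySem.Set.empty]]
  exact aux n

-- ===== VERDICT (by name: the statement is the Claim_ definition above) =====
theorem partTwo_spec : Claim_unchanged_partTwo := by
  intro chars _ hD
  rw [pvPartTwo_cols, pvPartTwoAlt_cols]
  congr 1
  rw [pvFlatMap_eq_map chars pvColA]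
  intro s hs
  by_cases hpair : s.toList ≠ [] ∧ ∀ c ∈ s.toList, 1000 ≤ s.toList.count c
  case neg => exact pvCol_agree s hpair
  by_cases hbeats : 'a' ∉ s.toList ∨ ∃ c ∈ s.toList, s.toList.count c < s.toList.count 'a' ∨
      (s.toList.count c = s.toList.count 'a' ∧ s.toList.idxOf c < s.toList.idxOf 'a')
  · exact absurd ⟨s, hs, hpair.1, hpair.2, hbeats⟩ hD
  · -- 'a' is itself the best character of this line: both columns are 'a'
    push Not at hbeats
    obtain ⟨ha, hnob⟩ := hbeats
    have hB := pvColB_isBest s hpair.1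
    obtain ⟨c, hcol, hbest⟩ := hB
    have hc : c = 'a' := by
      rcases hbest.2 'a' ha with h' | h'
      · have := hnob c hbest.1
        omega
      · have h2 := hnob c hbest.1
        by_cases hca : c = 'a'
        · exact hca
        · exfalso
          have hidxne : s.toList.idxOf c ≠ s.toList.idxOf 'a' := by
            intro hid
            apply hca
            have hlt : s.toList.idxOf c < s.toList.length := List.idxOf_lt_length_of_mem hbest.1
            have hlta : s.toList.idxOf 'a' < s.toList.length := List.idxOf_lt_length_of_mem ha
            have e1 : s.toList[s.toList.idxOf c]'hlt = c := List.getElem_idxOf hlt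
            have e2 : s.toList[s.toList.idxOf 'a']'hlta = 'a' := List.getElem_idxOf hlta
            rw [← e1, ← e2]
            simp_rw [hid]
          omega
    rw [hcol, hc, pvColA_sentinel s hpair.2]

set_option maxRecDepth 100000 in
set_option maxHeartbeats 2000000 in
theorem partTwo_changed : Claim_changed_partTwo := by
  unfold Claim_changed_partTwo
  set w : String := "bbbbbbbbbbbbbbbbbbbbbbbbbbbbbbbbbbbbbbbbbbbbbbbbbbbbbbbbbbbbbbbbbbbbbbbbbbbbbbbbbbbbbbbbbbbbbbbbbbbbbbbbbbbbbbbbbbbbbbbbbbbbbbbbbbbbbbbbbbbbbbbbbbbbbbbbbbbbbbbbbbbbbbbbbbbbbbbbbbbbbbbbbbbbbbbbbbbbbbbbbbbbbbbbbbbbbbbbbbbbbbbbbbbbbbbbbbbbbbbbbbbbbbbbbbbbbbbbbbbbbbbbbbbbbbbbbbbbbbbbbbbbbbbbbbbbbbbbbbbbbbbbbbbbbbbbbbbbbbbbbbbbbbbbbbbbbbbbbbbbbbbbbbbbbbbbbbbbbbbbbbbbbbbbbbbbbbbbbbbbbbbbbbbbbbbbbbbbbbbbbbbbbbbbbbbb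bbbbbbbbbbbbbbbbbbbbbbbbbbbbbbbbbbbbbbbbbbbbbbbbbbbbbbbbbbbbbbbbbbbbbbbbbbbbbbbbbbbbbbbbbbbbbbbbbbbbbbbbbbbbbbbbbbbbbbbbbbbbbbbbbbbbbbbbbbbbbbbbbbbbbbbbbbbbbbbbbbbbbbbbbbbbbbbbbbbbbbbbbbbbbbbbbbbbbbbbbbbbbbbbbbbbbbbbbbbbbbbbbbbbbbbbbbbbbbbbbbbbbbbbbbbbbbbbbbbbbbbbbbbbbbbbbbbbbbbbbbbbbbbbbbbbbbbbbbbbbbbbbbbbbbbbbbbbbbbbbbbbbbbbbbbbbbbbbbbbbbbbbbbbbbbbbbbbbbbbbbbbbbbbbbbbbbbbbbbbbbbbbbbbbbbbbbbbbbbbbbbbbbbbbbbbbbbbbbbbbbbbbbbbbbbbbbbbbbbbbbbbbbbbbbbbbbbbbbbbbbbbbbbbbbbbbbbbbbbbbbbbbbbbbbbbbbbbbbbbbbbbbbbbbbbbbbbbbbbbbbbbbbbbbbbbbbbbbbbbbbbbbbbbbbbbbbbbbbbbbbbbbbbbbbbbbbbbbbbbbbbbbbbb" with hw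
  have hw2 : w = String.ofList (List.replicate 1000 'b') := by rw [hw]; decide
  have hwl : w.toList = List.replicate 1000 'b' := by rw [hw2, String.toList_ofList]
  have hof : PySem.Set.ofList w.toList = ['b'] := by
    rw [hwl]; exact pvOfList_replicate_b 999
  have hcountb : w.toList.count 'b' = 1000 := by
    rw [hwl, List.count_replicate]; rfl
  have hallcnt : ∀ c ∈ w.toList, 1000 ≤ w.toList.count c := by
    intro c hc
    rw [hwl, List.mem_replicate] at hc
    rw [hc.2, hcountb]
  have hwne : w.toList ≠ [] := by
    rw [hwl]
    intro h
    have hlen := congrArg List.length h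
    rw [List.length_replicate] at hlen
    exact absurd hlen (by decide)
  have hA : pvColA w = 'a' := by
    rw [pvColA, hof]
    simp only [List.map_cons, List.map_nil, pvFirstMin, hcountb]
    norm_num
  have hB : pvColB w = ['b'] := by
    obtain ⟨c, hcol, hbest⟩ := pvColB_isBest w hwne
    have : c = 'b' := by
      have := hbest.1
      rw [hwl, List.mem_replicate] at this
      exact this.2
    rw [hcol, this]
  refine ⟨?_, ?_, ?_, ?_, by decide⟩
  · show Dom_partTwo [w]
    unfold Dom_partTwo
    simp only [List.all_cons, List.all_nil, Bool.and_true]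
    rw [pvDomStr, hwl, List.all_eq_true]
    intro c hc
    rw [(List.mem_replicate.mp hc).2]
    rfl
  · show D_partTwo [w]
    refine ⟨w, List.mem_cons_self .., hwne, hallcnt, Or.inl ?_⟩
    rw [hwl]
    simp
  · show partTwo [w] = "a"
    rw [pvPartTwo_cols, List.map_cons, List.map_nil, hA]
  · show partTwo_alt [w] = "b"
    rw [pvPartTwoAlt_cols, List.flatMap_cons, List.flatMap_nil, hB]
    rfl

theorem partTwo_tight : Claim_exact_partTwo := by
  intro chars _ hD heq
  obtain ⟨s, hs, hne, hall, hbad⟩ := hD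
  rw [pvPartTwo_cols, pvPartTwoAlt_cols,
    pvFlatMap_eq_map chars pvColBc (fun t _ => pvColB_eq t)] at heq
  have hmapeq : chars.map pvColA = chars.map pvColBc := by
    have := congrArg String.toList heq
    simpa using this
  have hcols : pvColA s = pvColBc s := List.map_inj_left.mp hmapeq s hs
  obtain ⟨c, hcol, hbest⟩ := pvColB_isBest s hne
  have hcc : c = pvColBc s := by
    have := hcol.symm.trans (pvColB_eq s)
    simpa using this
  have hA : pvColA s = 'a' := pvColA_sentinel s hall
  have hca : c = 'a' := by rw [hcc, ← hcols, hA]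
  subst hca
  rcases hbad with ha | ⟨d, hd, hbeats⟩
  · exact ha hbest.1
  · rcases hbest.2 d hd with h' | h' <;> omega
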